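-- pv_equiv track=rewrite | github.com/byarmis/AdventOfCode | AoC2017/Day_1/Day_1_InverseCaptcha.py | inverse_captcha_p2
-- ===== SOURCE A (Python) =====
-- def inverse_captcha_p2(i):
--     o = 0
--     i = str(i)
--     assert len(i) % 2 == 0, 'Length of input must be even'
--
--     for first, second in zip(i, i[len(i) // 2 : ]):
--         if first == second:
--             o += int(first)
--
--     return o * 2
-- ===== SOURCE B (Python) =====
-- def inverse_captcha_p2(i):
--     s = str(i)
--     n = len(s)
--     assert n % 2 == 0, 'Length of input must be even'
--     total = 0
--     for j in range(n):
--         if s[j] == s[(j + n // 2) % n]: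
--             total += int(s[j])
--     return total
-- ===== Notes on version B (the rewrite author's own statement) =====
-- stated objective: alternative
-- what changed: B replaces A's zip of the string with its second half plus final doubling by a single circular scan over all n positions comparing s[j] with s[(j+n//2)%n] and summing directly, with no *2 at the end.
import Mathlib
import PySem

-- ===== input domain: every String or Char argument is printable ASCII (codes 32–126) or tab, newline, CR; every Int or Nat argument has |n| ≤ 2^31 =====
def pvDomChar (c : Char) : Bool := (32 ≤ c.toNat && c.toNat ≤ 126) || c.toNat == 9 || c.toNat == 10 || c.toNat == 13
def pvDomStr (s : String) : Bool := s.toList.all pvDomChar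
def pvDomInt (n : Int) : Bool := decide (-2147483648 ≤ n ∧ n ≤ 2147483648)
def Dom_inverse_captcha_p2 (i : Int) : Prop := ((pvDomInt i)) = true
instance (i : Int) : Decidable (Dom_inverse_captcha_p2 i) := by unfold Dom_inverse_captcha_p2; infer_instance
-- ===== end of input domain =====

-- B replaces A's zip-with-second-half plus final doubling by a single circular scan over all
-- positions comparing s[j] with s[(j+n//2)%n] and summing directly (alternative decomposition, same cost).

-- ===== PORT A =====
-- int(first) is evaluated only when first == second; the matched character is then a digit
-- (a '-' sign occurs at most once in str(i)), so the `.getD 0` default is never taken.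
def inverse_captcha_p2 (i : Int) : Int :=
  (List.zip (PySem.Int.toChars i)
      (PySem.List.slice (PySem.Int.toChars i)
        (some (PySem.Int.floordiv (((PySem.Int.toChars i).length : Int)) 2)) none)).foldl
    (fun o p => if p.1 == p.2 then o + (PySem.Int.ofChars? [p.1]).getD 0 else o) 0
    * 2

-- ===== PORT B =====
-- same remark: int(s[j]) is only reached when s[j] equals its halfway-around partner, a digit.
def inverse_captcha_p2_alt (i : Int) : Int :=
  (PySem.List.pyRange 0 (((PySem.Int.toChars i).length : Int)) 1).foldl
    (fun o j =>
      if PySem.List.pyGetD (PySem.Int.toChars i) j ' '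
           == PySem.List.pyGetD (PySem.Int.toChars i)
                (PySem.Int.mod (j + PySem.Int.floordiv (((PySem.Int.toChars i).length : Int)) 2)
                  (((PySem.Int.toChars i).length : Int))) ' '
      then o + (PySem.Int.ofChars? [PySem.List.pyGetD (PySem.Int.toChars i) j ' ']).getD 0 else o) 0

-- ===== PRECONDITION & SPEC =====
-- A asserts that len(str(i)) is even and raises AssertionError otherwise; Pre_ excludes exactly those inputs.
def Pre_inverse_captcha_p2 (i : Int) : Prop := (PySem.Int.toChars i).length % 2 = 0
instance (i : Int) : Decidable (Pre_inverse_captcha_p2 i) := by unfold Pre_inverse_captcha_p2; infer_instance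
def pvWitness_inverse_captcha_p2 : Int := 1212

def Spec_inverse_captcha_p2 (i : Int) (out : Int) : Prop := out = inverse_captcha_p2_alt i
instance (i : Int) (out : Int) : Decidable (Spec_inverse_captcha_p2 i out) := by unfold Spec_inverse_captcha_p2; infer_instance

-- ===== CLAIM (what is proved, stated in full; the proofs are below) =====
def Claim_equal_inverse_captcha_p2 : Prop := ∀ (i : Int), Dom_inverse_captcha_p2 i → Pre_inverse_captcha_p2 i → Spec_inverse_captcha_p2 i (inverse_captcha_p2 i)

-- ===== LEMMAS AND PROOFS =====

-- digit value helper used only in the proofs (both ports inline this expression)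
def pvDig (c : Char) : Int := (PySem.Int.ofChars? [c]).getD 0

-- core: on a list of even length h+h, the full circular scan equals twice the half-zip scan
theorem pv_core (s : List Char) (h : Nat) (hs : s.length = h + h) :
    ((List.range (h + h)).map
        (fun j => if s.getD j ' ' == s.getD ((j + h) % (h + h)) ' ' then pvDig (s.getD j ' ') else 0)).sum
      = 2 * ((s.zip (s.drop h)).map (fun p => if p.1 == p.2 then pvDig p.1 else 0)).sum := by
  have hlenz : (s.zip (s.drop h)).length = h := by
    simp [List.length_zip, hs]
  have h1 : (List.range h).map
      (fun j => if s.getD j ' ' == s.getD ((j + h) % (h + h)) ' ' then pvDig (s.getD j ' ') else 0)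
      = (s.zip (s.drop h)).map (fun p => if p.1 == p.2 then pvDig p.1 else 0) := by
    apply List.ext_getElem
    · simp [hlenz]
    · intro j hj1 hj2
      have hjh : j < h := by simpa using hj1
      have hmod : (j + h) % (h + h) = j + h := Nat.mod_eq_of_lt (by omega)
      have hj' : j < s.length := by omega
      have hjh' : j + h < s.length := by omega
      have hd : j < (s.drop h).length := by simp [hs]; omega
      simp [hmod, List.getElem_zip, List.getD_eq_getElem?_getD, List.getElem?_eq_getElem hj',
        List.getElem?_eq_getElem hjh', List.getElem_drop, Nat.add_comm h j]
  have h2 : (List.range h).map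
      ((fun j => if s.getD j ' ' == s.getD ((j + h) % (h + h)) ' ' then pvDig (s.getD j ' ') else 0)
        ∘ (fun j => h + j))
      = (s.zip (s.drop h)).map (fun p => if p.1 == p.2 then pvDig p.1 else 0) := by
    apply List.ext_getElem
    · simp [hlenz]
    · intro j hj1 hj2
      have hjh : j < h := by simpa using hj1
      have hmod : (h + j + h) % (h + h) = j := by
        have : h + j + h = (h + h) + j := by omega
        rw [this, Nat.add_mod_left]
        exact Nat.mod_eq_of_lt (by omega)
      have hj' : j < s.length := by omega
      have hjh' : h + j < s.length := by omega
      have hd : j < (s.drop h).length := by simp [hs]; omega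
      simp only [Function.comp_apply, List.getElem_map, List.getElem_range, hmod,
        List.getElem_zip, List.getD_eq_getElem?_getD, List.getElem?_eq_getElem hj',
        List.getElem?_eq_getElem hjh', List.getElem_drop, Option.getD_some]
      by_cases hc : s[h + j] = s[j]
      · simp [hc]
      · have hc' : s[j] ≠ s[h + j] := fun e => hc e.symm
        simp [hc, hc']
  rw [List.range_add, List.map_append, List.sum_append, List.map_map, h1, h2]
  ring

theorem pv_main (i : Int) (hpre : Pre_inverse_captcha_p2 i) :
    inverse_captcha_p2 i = inverse_captcha_p2_alt i := by
  unfold inverse_captcha_p2 inverse_captcha_p2_alt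
  unfold Pre_inverse_captcha_p2 at hpre
  generalize hg : PySem.Int.toChars i = s at *
  obtain ⟨h, hs⟩ : ∃ h, s.length = h + h := ⟨s.length / 2, by omega⟩
  have hfd : PySem.Int.floordiv ((s.length : Int)) 2 = ((s.length / 2 : Nat) : Int) :=
    PySem.Int.floordiv_natCast s.length 2
  have hhalf : s.length / 2 = h := by omega
  rw [hfd, hhalf, PySem.List.slice_from_natCast]
  -- A's fold → sum
  have hA : (List.zip s (s.drop h)).foldl
      (fun o p => if p.1 == p.2 then o + (PySem.Int.ofChars? [p.1]).getD 0 else o) 0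
      = ((s.zip (s.drop h)).map (fun p => if p.1 == p.2 then pvDig p.1 else 0)).sum := by
    have step : (List.zip s (s.drop h)).foldl
        (fun o p => if p.1 == p.2 then o + (PySem.Int.ofChars? [p.1]).getD 0 else o) 0
        = (List.zip s (s.drop h)).foldl
        (fun (o : Int) (p : Char × Char) => o + (if p.1 == p.2 then pvDig p.1 else 0)) 0 :=
      PySem.List.foldl_congr_mem _ _ _ _ (by
        intro acc x _
        simp only [pvDig]
        split_ifs <;> simp)
    rw [step, PySem.List.foldl_add]
    simp
  -- B's fold → sum over List.range
  have hB : (PySem.List.pyRange 0 ((s.length : Int)) 1).foldl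
      (fun o j =>
        if PySem.List.pyGetD s j ' '
             == PySem.List.pyGetD s (PySem.Int.mod (j + ((h : Nat) : Int)) ((s.length : Int))) ' '
        then o + (PySem.Int.ofChars? [PySem.List.pyGetD s j ' ']).getD 0 else o) 0
      = ((List.range s.length).map
          (fun j => if s.getD j ' ' == s.getD ((j + h) % s.length) ' ' then pvDig (s.getD j ' ') else 0)).sum := by
    rw [PySem.List.pyRange_zero_natCast, List.foldl_map]
    have step : (List.range s.length).foldl
        (fun o j =>
          if PySem.List.pyGetD s ((j : Nat) : Int) ' '
               == PySem.List.pyGetD s (PySem.Int.mod (((j : Nat) : Int) + ((h : Nat) : Int)) ((s.length : Int))) ' '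
          then o + (PySem.Int.ofChars? [PySem.List.pyGetD s ((j : Nat) : Int) ' ']).getD 0 else o) 0
        = (List.range s.length).foldl
        (fun (o : Int) (j : Nat) =>
          o + (if s.getD j ' ' == s.getD ((j + h) % s.length) ' ' then pvDig (s.getD j ' ') else 0)) 0 :=
      PySem.List.foldl_congr_mem _ _ _ _ (by
        intro acc j _
        have e1 : ((j : Nat) : Int) + ((h : Nat) : Int) = (((j + h : Nat)) : Int) := by push_cast; ring
        have e2 : PySem.Int.mod (((j + h : Nat)) : Int) ((s.length : Int))
            = (((j + h) % s.length : Nat) : Int) := PySem.Int.mod_natCast _ _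
        rw [e1, e2, PySem.List.pyGetD_natCast, PySem.List.pyGetD_natCast]
        simp only [pvDig]
        split_ifs <;> simp)
    rw [step, PySem.List.foldl_add]
    simp
  rw [hA, hB, hs]
  rw [pv_core s h hs]
  ring

-- ===== VERDICT (by name: the statement is the Claim_ definition above) =====
theorem inverse_captcha_p2_spec : Claim_equal_inverse_captcha_p2 := by
  intro i _ hpre
  unfold Spec_inverse_captcha_p2
  exact pv_main i hpre
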